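-- pv_equiv track=rewrite | github.com/k7tzu/python-workspace | BNS/subject-22/exercise-1.py | recherche_indices_classement
-- ===== SOURCE A (Python) =====
-- def recherche_indices_classement(elt, tab):
--     """
--     >>> recherche_indices_classement(3, [1, 3, 4, 2, 4, 6, 3, 0])
--     ([0, 3, 7], [1, 6], [2, 4, 5])
--     >>> recherche_indices_classement(3, [1, 4, 2, 4, 6, 0])
--     ([0, 2, 5], [], [1, 3, 4])
--     >>> recherche_indices_classement(3, [1, 1, 1, 1])
--     ([0, 1, 2, 3], [], [])
--     >>> recherche_indices_classement(3, [])
--     ([], [], [])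
--     """
--     result = ([], [], [])
--     for i in range(len(tab)):
--         if tab[i] < elt:
--             result[0].append(i)
--         elif tab[i] == elt:
--             result[1].append(i)
--         else:
--             result[2].append(i)
--     return result
-- ===== SOURCE B (Python) =====
-- def recherche_indices_classement(elt, tab):
--     return ([i for i, x in enumerate(tab) if x < elt],
--             [i for i, x in enumerate(tab) if x == elt],
--             [i for i, x in enumerate(tab) if x > elt])
-- ===== Notes on version B (the rewrite author's own statement) =====
-- stated objective: idiomatic
-- what changed: Replaces the single indexed loop that branches and appends into a mutable triple by three independent filtering comprehensions over enumerate, one per bucket.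
import Mathlib
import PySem

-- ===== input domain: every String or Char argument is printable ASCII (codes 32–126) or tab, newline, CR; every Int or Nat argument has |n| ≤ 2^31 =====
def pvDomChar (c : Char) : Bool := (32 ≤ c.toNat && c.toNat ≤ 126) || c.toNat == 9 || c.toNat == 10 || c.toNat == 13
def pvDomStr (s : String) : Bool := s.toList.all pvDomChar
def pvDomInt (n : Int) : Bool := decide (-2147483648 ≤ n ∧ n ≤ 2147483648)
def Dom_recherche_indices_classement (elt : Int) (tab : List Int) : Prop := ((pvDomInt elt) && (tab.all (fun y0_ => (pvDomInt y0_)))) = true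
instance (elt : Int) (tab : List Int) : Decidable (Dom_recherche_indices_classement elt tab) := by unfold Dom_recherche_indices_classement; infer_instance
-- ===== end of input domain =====

-- B replaces A's single index loop that branches into a mutable triple by three
-- independent filtering passes over enumerate (idiomatic; same O(n) cost).

-- ===== PORT A =====
-- for i in range(len(tab)): branch on tab[i] and append i to the matching component
def recherche_indices_classement (elt : Int) (tab : List Int) : List Int × List Int × List Int :=
  (PySem.List.pyRange 0 (PySem.List.len tab) 1).foldl
    (fun result i =>
      if PySem.List.pyGetD tab i 0 < elt then (result.1 ++ [i], result.2.1, result.2.2)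
      else if PySem.List.pyGetD tab i 0 = elt then (result.1, result.2.1 ++ [i], result.2.2)
      else (result.1, result.2.1, result.2.2 ++ [i]))
    ([], [], [])

-- ===== PORT B =====
-- three list comprehensions over enumerate(tab)
def recherche_indices_classement_alt (elt : Int) (tab : List Int) : List Int × List Int × List Int :=
  (((PySem.List.enumerate tab 0).filter (fun p => p.2 < elt)).map (·.1),
   ((PySem.List.enumerate tab 0).filter (fun p => p.2 == elt)).map (·.1),
   ((PySem.List.enumerate tab 0).filter (fun p => elt < p.2)).map (·.1))

-- ===== PRECONDITION & SPEC =====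
def Spec_recherche_indices_classement (elt : Int) (tab : List Int) (out : List Int × List Int × List Int) : Prop := out = recherche_indices_classement_alt elt tab
instance (elt : Int) (tab : List Int) (out : List Int × List Int × List Int) : Decidable (Spec_recherche_indices_classement elt tab out) := by unfold Spec_recherche_indices_classement; infer_instance

-- ===== CLAIM (what is proved, stated in full; the proofs are below) =====
def Claim_equal_recherche_indices_classement : Prop := ∀ (elt : Int) (tab : List Int), Dom_recherche_indices_classement elt tab → Spec_recherche_indices_classement elt tab (recherche_indices_classement elt tab)

-- ===== LEMMAS AND PROOFS =====

-- A's branched fold over any pair list equals the three filters, modulo accumulators.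
theorem foldl_partition (elt : Int) (L : List (Int × Int)) (a b c : List Int) :
    L.foldl
      (fun (result : List Int × List Int × List Int) (p : Int × Int) =>
        if p.2 < elt then (result.1 ++ [p.1], result.2.1, result.2.2)
        else if p.2 = elt then (result.1, result.2.1 ++ [p.1], result.2.2)
        else (result.1, result.2.1, result.2.2 ++ [p.1])) (a, b, c)
    = (a ++ (L.filter (fun p => p.2 < elt)).map (·.1),
       b ++ (L.filter (fun p => p.2 == elt)).map (·.1),
       c ++ (L.filter (fun p => elt < p.2)).map (·.1)) := by
  induction L generalizing a b c with
  | nil => simp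
  | cons x L ih =>
    by_cases h1 : x.2 < elt
    · have h2 : ¬ x.2 = elt := by omega
      have h3 : ¬ elt < x.2 := by omega
      simp [h1, h2, h3, ih]
    · by_cases h2 : x.2 = elt
      · have h3 : ¬ elt < x.2 := by omega
        simp [h2, ih]
      · have h3 : elt < x.2 := by omega
        simp [h1, h2, h3, ih]

theorem recherche_indices_classement_eq (elt : Int) (tab : List Int) :
    recherche_indices_classement elt tab = recherche_indices_classement_alt elt tab := by
  unfold recherche_indices_classement recherche_indices_classement_alt
  have key := foldl_partition elt (PySem.List.enumerate tab 0) ([] : List Int) [] []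
  rw [PySem.List.enumerate_eq_map_pyRange (xs := tab) (d := 0), List.foldl_map] at key
  rw [PySem.List.enumerate_eq_map_pyRange (xs := tab) (d := 0)]
  simpa using key

-- ===== VERDICT (by name: the statement is the Claim_ definition above) =====
theorem recherche_indices_classement_spec : Claim_equal_recherche_indices_classement := by
  intro elt tab _
  exact recherche_indices_classement_eq elt tab
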